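-- pv_equiv track=rewrite | github.com/AIRKON-25/UTILS | make_labels/label_editor.py | parse_class_choices
-- ===== SOURCE A (Python) =====
-- from typing import List, Optional, Sequence, Set, Tuple
--
-- def parse_class_choices(raw: str) -> Optional[List[int]]:
--     cleaned: List[int] = []
--     seen = set()
--     for token in (raw or "").split(","):
--         t = token.strip()
--         if not t:
--             continue
--         try:
--             value = int(t)
--         except ValueError:
--             continue
--         if value in seen:
--             continue
--         seen.add(value)
--         cleaned.append(value)
--     return cleaned or None
-- ===== SOURCE B (Python) =====
-- def parse_class_choices(raw):
--     values = []
--     for tok in (raw or "").split(","):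
--         try:
--             values.append(int(tok.strip()))
--         except ValueError:
--             pass
--     result = [v for i, v in enumerate(values) if v not in values[:i]]
--     return result if result else None
-- ===== Notes on version B (the rewrite author's own statement) =====
-- stated objective: alternative
-- what changed: Replaces A's fused loop maintaining a seen-set with no auxiliary structure at all: collect every parsed value (empty tokens folded into the ValueError path), then keep v at position i iff v does not occur in the prefix values[:i] (quadratic slice-membership dedup).
import Mathlib
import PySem

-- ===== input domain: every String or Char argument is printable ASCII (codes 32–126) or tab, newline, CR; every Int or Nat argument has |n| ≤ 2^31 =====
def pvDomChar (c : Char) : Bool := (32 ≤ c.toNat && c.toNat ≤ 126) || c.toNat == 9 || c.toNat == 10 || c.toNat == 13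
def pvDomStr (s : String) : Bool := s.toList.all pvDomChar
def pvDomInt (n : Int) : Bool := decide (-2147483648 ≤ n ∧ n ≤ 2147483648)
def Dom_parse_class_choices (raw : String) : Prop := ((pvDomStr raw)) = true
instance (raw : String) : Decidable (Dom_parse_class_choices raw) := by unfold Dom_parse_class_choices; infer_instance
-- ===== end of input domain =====

-- B drops A's seen-set entirely: it collects every parsed value, then keeps v at
-- position i iff v is absent from the prefix values[:i] (quadratic dedup); same result.


-- ===== PORT A =====
-- one loop iteration of A: strip, skip empty, try int(), skip seen, else append + add
def pvStepA (st : List Int × PySem.Set Int) (token : String) : List Int × PySem.Set Int :=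
  let t := PySem.Str.strip token
  if t = "" then st
  else
    match PySem.Int.ofStr? t with
    | none => st
    | some value =>
      if PySem.Set.contains st.2 value then st
      else (st.1 ++ [value], PySem.Set.add st.2 value)

def parse_class_choices (raw : String) : Option (List Int) :=
  let cleaned :=
    (((PySem.Chars.splitOn (if raw = "" then "" else raw).toList ",".toList).map String.ofList).foldl pvStepA
      ([], PySem.Set.empty)).1
  if cleaned = [] then none else some cleaned

-- ===== PORT B =====
-- int(tok.strip()) in a try/except: int("") raises ValueError too, so one filterMap
def parse_class_choices_alt (raw : String) : Option (List Int) :=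
  let values :=
    ((PySem.Chars.splitOn (if raw = "" then "" else raw).toList ",".toList).map String.ofList).filterMap
      (fun tok => PySem.Int.ofStr? (PySem.Str.strip tok))
  let result :=
    (PySem.List.enumerate values).filterMap
      (fun p => if p.2 ∈ PySem.List.slice values none (some p.1) then none else some p.2)
  if result = [] then none else some result

-- ===== PRECONDITION & SPEC =====
def Spec_parse_class_choices (raw : String) (out : Option (List Int)) : Prop := out = parse_class_choices_alt raw
instance (raw : String) (out : Option (List Int)) : Decidable (Spec_parse_class_choices raw out) := by unfold Spec_parse_class_choices; infer_instance

-- ===== CLAIM (what is proved, stated in full; the proofs are below) =====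
def Claim_equal_parse_class_choices : Prop := ∀ (raw : String), Dom_parse_class_choices raw → Spec_parse_class_choices raw (parse_class_choices raw)

-- ===== LEMMAS AND PROOFS =====

-- abstract "keep first occurrences, given already-seen prefix" recursion
def pvPref (seenPre : List Int) : List Int → List Int
  | [] => []
  | x :: rest => (if x ∈ seenPre then [] else [x]) ++ pvPref (seenPre ++ [x]) rest

lemma pvPref_congr (s1 s2 : List Int) (l : List Int) (h : ∀ v, v ∈ s1 ↔ v ∈ s2) :
    pvPref s1 l = pvPref s2 l := by
  induction l generalizing s1 s2 with
  | nil => rfl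
  | cons x rest ih =>
    simp only [pvPref]
    rw [ih (s1 ++ [x]) (s2 ++ [x]) (by intro v; simp [h v])]
    by_cases hx : x ∈ s1
    · simp [hx, (h x).mp hx]
    · have hx2 : x ∉ s2 := fun m => hx ((h x).mpr m)
      simp [hx, hx2]

-- A's loop, started with seen = cleaned, stays diagonal and computes pvPref
set_option maxHeartbeats 1600000 in
lemma pvFoldA (tokens : List String) (c : List Int) :
    tokens.foldl pvStepA (c, c) =
      (c ++ pvPref c (tokens.filterMap (fun tok => PySem.Int.ofStr? (PySem.Str.strip tok))),
       c ++ pvPref c (tokens.filterMap (fun tok => PySem.Int.ofStr? (PySem.Str.strip tok)))) := by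
  induction tokens generalizing c with
  | nil => simp [pvPref]
  | cons tok rest ih =>
    simp only [List.foldl_cons, List.filterMap_cons]
    have hstep : pvStepA (c, c) tok =
        match PySem.Int.ofStr? (PySem.Str.strip tok) with
        | none => (c, c)
        | some v => (if v ∈ c then c else c ++ [v], if v ∈ c then c else c ++ [v]) := by
      unfold pvStepA
      by_cases ht : PySem.Str.strip tok = ""
      · simp [ht]; rfl
      · simp only [ht, if_false]
        cases hv : PySem.Int.ofStr? (PySem.Str.strip tok) with
        | none => rfl
        | some v =>
          simp only [PySem.Set.contains, PySem.Set.add]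
          by_cases hc : v ∈ c <;> simp [hc]
    rw [hstep]
    cases hv : PySem.Int.ofStr? (PySem.Str.strip tok) with
    | none => simpa [pvPref] using ih c
    | some v =>
      by_cases hc : v ∈ c
      · simp only [hc, if_true]
        rw [ih c, pvPref_congr c (c ++ [v]) _ (by intro w; simp; rintro rfl; exact hc)]
        simp [pvPref, hc]
      · simp only [hc, if_false]
        rw [ih (c ++ [v])]
        simp [pvPref, hc]

-- B's prefix-membership filter is the same recursion
lemma pvFilterB (l acc full : List Int) (hfull : full = acc ++ l) :
    (PySem.List.enumerate l (acc.length : Int)).filterMap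
      (fun p => if p.2 ∈ PySem.List.slice full none (some p.1) then none else some p.2) =
    pvPref acc l := by
  induction l generalizing acc with
  | nil => simp [PySem.List.enumerate_nil, pvPref]
  | cons x rest ih =>
    rw [PySem.List.enumerate_cons, List.filterMap_cons]
    have hslice : PySem.List.slice full none (some (acc.length : Int)) = acc := by
      rw [PySem.List.slice_to_natCast, hfull]
      simp
    have hrec := ih (acc ++ [x]) (by simpa using hfull)
    have hlen : ((acc ++ [x]).length : Int) = (acc.length : Int) + 1 := by
      simp
    rw [hlen] at hrec
    simp only [pvPref, hslice, hrec]
    by_cases hx : x ∈ acc <;> simp [hx]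

lemma pvFilterB0 (l : List Int) :
    (PySem.List.enumerate l).filterMap
      (fun p => if p.2 ∈ PySem.List.slice l none (some p.1) then none else some p.2) =
    pvPref [] l := by
  simpa using pvFilterB l [] l rfl

-- ===== VERDICT (by name: the statement is the Claim_ definition above) =====
theorem parse_class_choices_spec : Claim_equal_parse_class_choices := by
  intro raw _
  show parse_class_choices raw = parse_class_choices_alt raw
  unfold parse_class_choices parse_class_choices_alt
  rw [show (PySem.Set.empty : PySem.Set Int) = ([] : List Int) from rfl, pvFoldA]
  simp only [List.nil_append, pvFilterB0]
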